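-- pv_equiv track=rewrite | github.com/iamgroot42/miots_project | python/myutils.py | findComments
-- ===== SOURCE A (Python) =====
-- def findComments(sourcecode):
--   """
--     Finds all comments in the source code.
--   """
--   commentareas = []
--
--   inacomment = False
--   commentstart = -1
--   commentend = -1
--
--   for pos, sc in enumerate(sourcecode):
--     if sc == "#":
--       if not inacomment:
--         commentstart = pos
--         inacomment = True
--
--     if sc == "\n":
--       if inacomment:
--         commentend = pos
--         inacomment = False
--
--     if commentstart >= 0 and commentend >= 0:
--       t = [commentstart, commentend]
--       commentareas.append(t)
--       commentstart = -1
--       commentend = -1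
--
--   return commentareas
-- ===== SOURCE B (Python) =====
-- def findComments(sourcecode):
--   """
--     Finds all comments in the source code.
--   """
--   commentareas = []
--   lines = sourcecode.split("\n")
--   offset = 0
--   for line in lines[:-1]:
--     k = line.find("#")
--     if k != -1:
--       commentareas.append([offset + k, offset + len(line)])
--     offset += len(line) + 1
--   return commentareas
-- ===== Notes on version B (the rewrite author's own statement) =====
-- stated objective: faster
-- what changed: Replaced the per-character state machine (inacomment flag, commentstart/commentend markers with reset logic) by a staged line decomposition: split the source on newlines once, then for each newline-terminated line emit the position of its first hash character and the newline position when it contains one, maintaining only a running offset.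
import Mathlib
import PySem

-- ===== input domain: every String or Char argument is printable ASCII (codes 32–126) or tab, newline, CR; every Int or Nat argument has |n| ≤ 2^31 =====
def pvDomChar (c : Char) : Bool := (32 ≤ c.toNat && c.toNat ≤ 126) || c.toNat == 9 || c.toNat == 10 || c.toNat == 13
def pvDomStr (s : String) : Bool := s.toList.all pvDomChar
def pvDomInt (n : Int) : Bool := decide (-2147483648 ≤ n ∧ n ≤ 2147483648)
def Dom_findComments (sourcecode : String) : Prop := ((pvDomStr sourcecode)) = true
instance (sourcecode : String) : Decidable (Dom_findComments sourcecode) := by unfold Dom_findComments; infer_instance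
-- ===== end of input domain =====

-- B replaces A's per-character state machine by a staged line decomposition (split on '\n',
-- then find the first hash in each newline-terminated line); same O(n), measured faster via C-level split/find.

-- ===== PORT A =====
-- the loop body, step for step: the '#' branch, the '\n' branch (reading the flag the '#' branch may have set), then the emit-and-reset check
def findComments.go : List Char → Int → Bool → Int → Int → List (List Int)
  | [], _, _, _, _ => []
  | sc :: rest, pos, inacomment, commentstart, commentend =>
    let p1 : Bool × Int :=
      if sc = '#' ∧ inacomment = false then (true, pos) else (inacomment, commentstart)
    let p2 : Bool × Int :=
      if sc = '\n' ∧ p1.1 = true then (false, pos) else (p1.1, commentend)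
    if p1.2 ≥ 0 ∧ p2.2 ≥ 0 then
      [p1.2, p2.2] :: findComments.go rest (pos + 1) p2.1 (-1) (-1)
    else
      findComments.go rest (pos + 1) p2.1 p1.2 p2.2

def findComments (sourcecode : String) : List (List Int) :=
  findComments.go sourcecode.toList 0 false (-1) (-1)

-- ===== PORT B =====
-- sourcecode.split("\n"), as (first segment, remaining segments) so the result is never empty
def findComments_alt.splitNL : List Char → List Char × List (List Char)
  | [] => ([], [])
  | c :: r =>
    if c = '\n' then ([], (findComments_alt.splitNL r).1 :: (findComments_alt.splitNL r).2)
    else (c :: (findComments_alt.splitNL r).1, (findComments_alt.splitNL r).2)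

-- line.find("#"): index of the first '#' in the line, or none (Python's -1)
def findComments_alt.findHash : List Char → Option Int
  | [] => none
  | c :: r => if c = '#' then some 0 else (findComments_alt.findHash r).map (· + 1)

-- the loop over lines[:-1] (a line followed by no further segment is the last and is skipped)
def findComments_alt.linesGo : List Char → List (List Char) → Int → List (List Int)
  | _, [], _ => []
  | ln, ln2 :: rest, off =>
    match findComments_alt.findHash ln with
    | none => findComments_alt.linesGo ln2 rest (off + ln.length + 1)
    | some k => [off + k, off + ln.length] :: findComments_alt.linesGo ln2 rest (off + ln.length + 1)

def findComments_alt (sourcecode : String) : List (List Int) :=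
  findComments_alt.linesGo (findComments_alt.splitNL sourcecode.toList).1
    (findComments_alt.splitNL sourcecode.toList).2 0

-- ===== PRECONDITION & SPEC =====
def Spec_findComments (sourcecode : String) (out : List (List Int)) : Prop := out = findComments_alt sourcecode
instance (sourcecode : String) (out : List (List Int)) : Decidable (Spec_findComments sourcecode out) := by unfold Spec_findComments; infer_instance

-- ===== CLAIM (what is proved, stated in full; the proofs are below) =====
def Claim_equal_findComments : Prop := ∀ (sourcecode : String), Dom_findComments sourcecode → Spec_findComments sourcecode (findComments sourcecode)

-- ===== LEMMAS AND PROOFS =====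

-- the two reachable shapes of A's state: outside a comment (flag down, both markers -1) A behaves
-- like B's per-line scan; inside a comment started at s ≥ 0 (flag up, end marker -1) A emits
-- [s, end of current line] iff the current line is newline-terminated, then resumes like B
theorem go_agree :
    ∀ (l : List Char) (pos : Int), 0 ≤ pos →
      (findComments.go l pos false (-1) (-1) =
        findComments_alt.linesGo (findComments_alt.splitNL l).1 (findComments_alt.splitNL l).2 pos) ∧
      (∀ s : Int, 0 ≤ s →
        findComments.go l pos true s (-1) =
          (match findComments_alt.splitNL l with
           | (_, []) => []
           | (ln, ln2 :: rest) =>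
             [s, pos + ln.length] :: findComments_alt.linesGo ln2 rest (pos + ln.length + 1))) := by
  intro l
  induction l with
  | nil =>
    intro pos _
    constructor
    · simp [findComments.go, findComments_alt.splitNL, findComments_alt.linesGo]
    · intro s _; simp [findComments.go, findComments_alt.splitNL]
  | cons c rest ih =>
    intro pos hpos
    obtain ⟨ih1, ih2⟩ := ih (pos + 1) (by omega)
    rcases hsp : findComments_alt.splitNL rest with ⟨ln0, tl0⟩
    rw [hsp] at ih1
    simp only [hsp] at ih2
    constructor
    · by_cases hc : c = '#'
      · -- '#' starts a comment at pos
        have h1 : findComments.go (c :: rest) pos false (-1) (-1)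
            = findComments.go rest (pos + 1) true pos (-1) := by
          simp [findComments.go, hc]
        rw [h1, ih2 pos hpos]
        subst hc
        simp only [findComments_alt.splitNL, if_neg (by decide : ¬('#' = '\n')), hsp]
        cases tl0 with
        | nil => simp [findComments_alt.linesGo]
        | cons b bs =>
          simp [findComments_alt.linesGo, findComments_alt.findHash]
          ring_nf
          simp
      · by_cases hn : c = '\n'
        · -- newline outside a comment: nothing happens, a new line starts
          have h1 : findComments.go (c :: rest) pos false (-1) (-1)
              = findComments.go rest (pos + 1) false (-1) (-1) := by
            simp [findComments.go, hn]
          rw [h1, ih1]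
          simp [findComments_alt.splitNL, hn, hsp, findComments_alt.linesGo,
            findComments_alt.findHash]
        · -- ordinary char: extends the current line
          have h1 : findComments.go (c :: rest) pos false (-1) (-1)
              = findComments.go rest (pos + 1) false (-1) (-1) := by
            simp [findComments.go, hc, hn]
          rw [h1, ih1]
          simp only [findComments_alt.splitNL, if_neg hn, hsp]
          cases tl0 with
          | nil => simp [findComments_alt.linesGo]
          | cons b bs =>
            simp only [findComments_alt.linesGo, findComments_alt.findHash, if_neg hc]
            cases hf : findComments_alt.findHash ln0 with
            | none => simp; ring_nf
            | some k =>
              simp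
              ring_nf
              simp
    · intro s hs
      by_cases hn : c = '\n'
      · -- newline ends the comment: emit [s, pos] and reset
        have h1 : findComments.go (c :: rest) pos true s (-1)
            = [s, pos] :: findComments.go rest (pos + 1) false (-1) (-1) := by
          simp [findComments.go, hn]
          omega
        rw [h1, ih1]
        simp [findComments_alt.splitNL, hn, hsp]
      · -- inside the comment any other char (even '#') is skipped; it extends the current line
        have h1 : findComments.go (c :: rest) pos true s (-1)
            = findComments.go rest (pos + 1) true s (-1) := by
          by_cases hc : c = '#' <;> simp [findComments.go, hc, hn]
        rw [h1, ih2 s hs]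
        simp only [findComments_alt.splitNL, if_neg hn, hsp]
        cases tl0 with
        | nil => simp
        | cons b bs =>
          simp
          ring_nf
          simp

-- ===== VERDICT (by name: the statement is the Claim_ definition above) =====
theorem findComments_spec : Claim_equal_findComments := by
  intro sourcecode _
  unfold Spec_findComments findComments findComments_alt
  exact (go_agree sourcecode.toList 0 (by omega)).1
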